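-- pv_equiv track=rewrite | github.com/PedroCarvalho03/Trabalhos-de-Comp1---Python | Lista4/lista4pedrorocha.py | perfil5
-- ===== SOURCE A (Python) =====
-- def perfil5(lista):
--     '''Entrada = list
--        Saida = booleano
--        Verifica se a lista tem o perfil de escher'''
--     pos = 0
--     n = len(lista)
--     res = False
--     k = 1
--     while pos<len(lista) and n-k>0:
--         if lista[pos] + lista[n-k] == lista[pos+1] + lista[n-(k+1)]:
--             res = True
--             pos = pos + 1
--             k = k + 1
--         else:
--             res = False
--             pos = len(lista)
--
--     return res
-- ===== SOURCE B (Python) =====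
-- def perfil5(lista):
--     if len(lista) < 2:
--         return False
--     return len({a + b for a, b in zip(lista, reversed(lista))}) == 1
-- ===== Notes on version B (the rewrite author's own statement) =====
-- stated objective: simpler
-- what changed: A's overlapping early-exit while-loop comparing each adjacent mirror-pair sum with a running flag is replaced by a len<2 guard plus building all mirror sums via zip(lista, reversed(lista)) and testing that their set is a singleton.
import Mathlib
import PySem

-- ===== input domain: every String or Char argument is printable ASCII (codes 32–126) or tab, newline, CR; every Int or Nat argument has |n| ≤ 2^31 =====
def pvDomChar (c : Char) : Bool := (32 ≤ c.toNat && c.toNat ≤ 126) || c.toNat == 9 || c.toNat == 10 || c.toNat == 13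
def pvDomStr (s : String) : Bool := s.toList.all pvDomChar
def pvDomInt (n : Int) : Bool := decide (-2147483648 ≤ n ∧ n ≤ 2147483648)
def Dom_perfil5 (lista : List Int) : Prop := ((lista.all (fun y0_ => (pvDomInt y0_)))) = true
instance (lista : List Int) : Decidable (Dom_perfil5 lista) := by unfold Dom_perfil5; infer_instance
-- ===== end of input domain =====

-- B replaces A's overlapping early-exit while-loop over a running flag by a guard plus
-- "collect all mirror sums and test that the set of them is a singleton" (objective: simpler).

-- ===== PORT A =====
-- All list accesses in A are provably in range (pos ≤ n-2, 1 ≤ k ≤ n-1 throughout),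
-- so the `.getD 0` default of this total helper is never taken.
def perfil5Get (lista : List Int) (i : Int) : Int := (PySem.List.pyGet? lista i).getD 0

def perfil5Loop (lista : List Int) (n pos k : Int) (res : Bool) : Bool :=
  if h : pos < (lista.length : Int) ∧ 0 < n - k then
    if perfil5Get lista pos + perfil5Get lista (n - k)
        == perfil5Get lista (pos + 1) + perfil5Get lista (n - (k + 1)) then
      perfil5Loop lista n (pos + 1) (k + 1) true
    else
      perfil5Loop lista n (lista.length : Int) k false
  else res
termination_by ((lista.length : Int) - pos).toNat
decreasing_by
  · omega
  · omega

def perfil5 (lista : List Int) : Bool :=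
  perfil5Loop lista (lista.length : Int) 0 1 false

-- ===== PORT B =====
-- the multiset of mirror sums lista[i] + lista[n-1-i], via zip(lista, reversed(lista))
def perfil5Sums (lista : List Int) : List Int :=
  (lista.zip lista.reverse).map (fun p => p.1 + p.2)

def perfil5_alt (lista : List Int) : Bool :=
  if lista.length < 2 then false
  else PySem.Set.len (PySem.Set.ofList (perfil5Sums lista)) == 1

-- ===== PRECONDITION & SPEC =====
def Spec_perfil5 (lista : List Int) (out : Bool) : Prop := out = perfil5_alt lista
instance (lista : List Int) (out : Bool) : Decidable (Spec_perfil5 lista out) := by unfold Spec_perfil5; infer_instance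

-- ===== CLAIM (what is proved, stated in full; the proofs are below) =====
def Claim_equal_perfil5 : Prop := ∀ (lista : List Int), Dom_perfil5 lista → Spec_perfil5 lista (perfil5 lista)

-- ===== LEMMAS AND PROOFS =====

-- adjacent-equality chain, the common characterisation of both programs
def adjEq : List Int → Bool
  | [] => true
  | [_] => true
  | a :: b :: t => a == b && adjEq (b :: t)

lemma adjEq_cons_iff (a : Int) (t : List Int) :
    adjEq (a :: t) = true ↔ ∀ y ∈ t, y = a := by
  induction t generalizing a with
  | nil => simp [adjEq]
  | cons b t ih =>
    simp only [adjEq, Bool.and_eq_true, beq_iff_eq, ih]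
    constructor
    · rintro ⟨rfl, h⟩ y hy
      rcases hy with _ | hy
      · rfl
      · exact h y (by assumption)
    · intro h
      refine ⟨(h b (by simp)).symm, ?_⟩
      intro y hy
      rw [h y (by simp [hy]), h b (by simp)]

lemma sums_length (lista : List Int) : (perfil5Sums lista).length = lista.length := by
  simp [perfil5Sums]

lemma sums_getElem (lista : List Int) (i : Nat) (h : i < lista.length) :
    (perfil5Sums lista)[i]'(by simpa [sums_length] using h) =
      lista[i] + lista[lista.length - 1 - i] := by
  simp [perfil5Sums, List.getElem_zip, List.getElem_reverse]

lemma get_nat (lista : List Int) (i : Nat) (h : i < lista.length) :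
    perfil5Get lista (i : Int) = lista[i] := by
  simp [perfil5Get, h]

-- the loop from position pos (with k = pos+1) computes the adjacent chain on the sums' suffix
lemma loop_drop (lista : List Int) :
    ∀ (d pos : Nat) (res : Bool), pos + d + 1 = lista.length → (d = 0 → res = true) →
      perfil5Loop lista (lista.length : Int) (pos : Int) ((pos : Int) + 1) res
        = adjEq ((perfil5Sums lista).drop pos) := by
  intro d
  induction d with
  | zero =>
    intro pos res hlen hres
    rw [perfil5Loop]
    have hcond : ¬ (((pos : Int) < (lista.length : Int)) ∧
        (0 : Int) < (lista.length : Int) - ((pos : Int) + 1)) := by omega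
    rw [dif_neg hcond, hres rfl]
    have hpos : pos < (perfil5Sums lista).length := by rw [sums_length]; omega
    rw [List.drop_eq_getElem_cons hpos]
    have : (perfil5Sums lista).drop (pos + 1) = [] := by
      apply List.drop_eq_nil_of_le; rw [sums_length]; omega
    rw [this]
    rfl
  | succ d ih =>
    intro pos res hlen _
    rw [perfil5Loop]
    have hcond : (((pos : Int) < (lista.length : Int)) ∧
        (0 : Int) < (lista.length : Int) - ((pos : Int) + 1)) := by omega
    rw [dif_pos hcond]
    have h0 : pos < lista.length := by omega
    have h1 : pos + 1 < lista.length := by omega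
    have h2 : lista.length - 1 - pos < lista.length := by omega
    have h3 : lista.length - 1 - (pos + 1) < lista.length := by omega
    have e0 : (lista.length : Int) - ((pos : Int) + 1) = ((lista.length - 1 - pos : Nat) : Int) := by
      omega
    have e1 : (lista.length : Int) - (((pos : Int) + 1) + 1)
        = ((lista.length - 1 - (pos + 1) : Nat) : Int) := by omega
    rw [e0, e1, get_nat lista pos h0, get_nat lista (lista.length - 1 - pos) h2,
        get_nat lista (lista.length - 1 - (pos + 1)) h3]
    have e2 : ((pos : Int) + 1) = ((pos + 1 : Nat) : Int) := by omega
    rw [e2, get_nat lista (pos + 1) h1]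
    have hpos : pos < (perfil5Sums lista).length := by rw [sums_length]; omega
    have hpos1 : pos + 1 < (perfil5Sums lista).length := by rw [sums_length]; omega
    rw [List.drop_eq_getElem_cons hpos, List.drop_eq_getElem_cons hpos1]
    rw [sums_getElem lista pos h0, sums_getElem lista (pos + 1) h1]
    by_cases hc :
        (lista[pos] + lista[lista.length - 1 - pos]
          == lista[pos + 1] + lista[lista.length - 1 - (pos + 1)]) = true
    · rw [if_pos hc]
      rw [ih (pos + 1) true (by omega) (fun _ => rfl),
          List.drop_eq_getElem_cons hpos1, sums_getElem lista (pos + 1) h1]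
      simp only [adjEq, hc, Bool.true_and]
    · rw [if_neg hc]
      rw [perfil5Loop]
      rw [dif_neg (show ¬ (((lista.length : Nat) : Int) < (lista.length : Int) ∧
          (0 : Int) < (lista.length : Int) - ((pos + 1 : Nat) : Int)) by omega)]
      simp only [adjEq, hc, Bool.false_and]

lemma foldl_add_const (a : Int) :
    ∀ t : List Int, (∀ y ∈ t, y = a) → List.foldl PySem.Set.add [a] t = [a] := by
  intro t
  induction t with
  | nil => intro _; rfl
  | cons b t ih =>
    intro h
    have hadd : PySem.Set.add [a] b = [a] := by
      rw [h b (by simp)]; simp [PySem.Set.add, PySem.Set.contains]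
    simp only [List.foldl_cons, hadd]
    exact ih (fun y hy => h y (by simp [hy]))

lemma set_singleton_iff (a : Int) (t : List Int) :
    PySem.Set.len (PySem.Set.ofList (a :: t)) = 1 ↔ ∀ y ∈ t, y = a := by
  constructor
  · intro h
    have hlen : (PySem.Set.ofList (a :: t)).length = 1 := by
      simp only [PySem.Set.len] at h; omega
    obtain ⟨z, hz⟩ := List.length_eq_one_iff.mp hlen
    have ha : a = z := by
      have := (PySem.Set.mem_ofList (a :: t) a).2 (by simp)
      simpa [hz] using this
    intro y hy
    have := (PySem.Set.mem_ofList (a :: t) y).2 (by simp [hy])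
    rw [hz] at this
    simp at this
    omega
  · intro h
    have key : PySem.Set.ofList (a :: t) = [a] := by
      rw [PySem.Set.ofList_eq_foldl]
      show List.foldl PySem.Set.add (PySem.Set.add [] a) t = [a]
      have base : PySem.Set.add ([] : PySem.Set Int) a = [a] := by
        simp [PySem.Set.add, PySem.Set.contains]
      rw [base]
      exact foldl_add_const a t h
    rw [key]
    rfl

lemma alt_eq_adjEq (lista : List Int) (h : 2 ≤ lista.length) :
    perfil5_alt lista = adjEq (perfil5Sums lista) := by
  unfold perfil5_alt
  rw [if_neg (by omega)]
  have hlen : 1 ≤ (perfil5Sums lista).length := by rw [sums_length]; omega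
  rcases hS : perfil5Sums lista with _ | ⟨a, t⟩
  · rw [hS] at hlen; simp at hlen
  · rw [Bool.eq_iff_iff, beq_iff_eq, set_singleton_iff, adjEq_cons_iff]

-- ===== VERDICT (by name: the statement is the Claim_ definition above) =====
theorem perfil5_spec : Claim_equal_perfil5 := by
  intro lista _
  show perfil5 lista = perfil5_alt lista
  unfold perfil5
  by_cases h : 2 ≤ lista.length
  · rw [alt_eq_adjEq lista h]
    have := loop_drop lista (lista.length - 1) 0 false (by omega) (by omega)
    simpa using this
  · rw [perfil5Loop]
    rw [dif_neg (by omega)]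
    unfold perfil5_alt
    rw [if_pos (by omega)]
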